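-- pv_equiv track=rewrite | github.com/maison-apricity/WhisperStudio | env_manager.py | humanize_compute_types
-- ===== SOURCE A (Python) =====
-- def humanize_compute_types(types: set[str] | list[str]) -> str:
--     order = [
--         "float16",
--         "bfloat16",
--         "float32",
--         "int8",
--         "int8_float16",
--         "int8_bfloat16",
--         "int8_float32",
--         "int16",
--     ]
--     label_map = {
--         "float16": "FP16",
--         "bfloat16": "BF16",
--         "float32": "FP32",
--         "int8": "INT8",
--         "int8_float16": "INT8 + FP16",
--         "int8_bfloat16": "INT8 + BF16",
--         "int8_float32": "INT8 + FP32",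
--         "int16": "INT16",
--     }
--     values = list(types)
--     values.sort(key=lambda x: order.index(x) if x in order else 999)
--     return ", ".join(label_map.get(v, v) for v in values) if values else "없음"
-- ===== SOURCE B (Python) =====
-- def humanize_compute_types(types):
--     order = [
--         "float16",
--         "bfloat16",
--         "float32",
--         "int8",
--         "int8_float16",
--         "int8_bfloat16",
--         "int8_float32",
--         "int16",
--     ]
--     label_map = {
--         "float16": "FP16",
--         "bfloat16": "BF16",
--         "float32": "FP32",
--         "int8": "INT8",
--         "int8_float16": "INT8 + FP16",
--         "int8_bfloat16": "INT8 + BF16",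
--         "int8_float32": "INT8 + FP32",
--         "int16": "INT16",
--     }
--     values = list(types)
--     if not values:
--         return "없음"
--     parts = []
--     for t in order:
--         for v in values:
--             if v == t:
--                 parts.append(label_map.get(t, t))
--     for v in values:
--         if v not in order:
--             parts.append(v)
--     return ", ".join(parts)
-- ===== Notes on version B (the rewrite author's own statement) =====
-- stated objective: alternative
-- what changed: Replaces A's stable sort by rank index with a bucket construction: one scan of the values per known type in the fixed order, then a pass emitting unknown labels in input order, so no sort is performed.
import Mathlib
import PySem

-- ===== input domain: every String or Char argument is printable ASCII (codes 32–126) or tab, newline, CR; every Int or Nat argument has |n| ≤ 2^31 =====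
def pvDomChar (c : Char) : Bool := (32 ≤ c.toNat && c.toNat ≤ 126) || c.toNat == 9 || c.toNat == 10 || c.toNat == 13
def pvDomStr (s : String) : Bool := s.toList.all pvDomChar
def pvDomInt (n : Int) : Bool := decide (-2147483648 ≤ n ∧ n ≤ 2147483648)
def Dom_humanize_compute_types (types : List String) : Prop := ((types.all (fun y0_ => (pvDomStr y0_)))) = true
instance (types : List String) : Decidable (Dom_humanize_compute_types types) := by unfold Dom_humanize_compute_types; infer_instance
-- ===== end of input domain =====

-- B replaces A's stable sort-by-rank with direct bucketing: one pass per known type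
-- in the fixed order, then the unknown labels in input order (objective: alternative).

-- ===== PORT A =====
-- shared module constants (the same literal list / dict both Python versions contain)

def pvOrder : List String :=
  ["float16", "bfloat16", "float32", "int8",
   "int8_float16", "int8_bfloat16", "int8_float32", "int16"]

def pvLabels : List (String × String) :=
  [("float16", "FP16"), ("bfloat16", "BF16"), ("float32", "FP32"),
   ("int8", "INT8"), ("int8_float16", "INT8 + FP16"), ("int8_bfloat16", "INT8 + BF16"),
   ("int8_float32", "INT8 + FP32"), ("int16", "INT16")]

-- A's sort key: `order.index(x) if x in order else 999` (the .getD default is unreachable: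
-- inside the branch `x in order` guarantees index? is some)
def pvKeyA (order : List String) (x : String) : Nat :=
  if order.contains x then (PySem.List.index? order x).getD 999 else 999

def humanize_compute_types (types : List String) : String :=
  let order := pvOrder
  let label_map := PySem.Dict.ofList pvLabels
  let values := types
  let values := PySem.List.sorted values (fun x => pvKeyA order x) false
  if values.isEmpty then "없음"
  else PySem.Str.join ", " (values.map (fun v => label_map.getD v v))

-- ===== PORT B =====
def humanize_compute_types_alt (types : List String) : String :=
  let order := pvOrder
  let label_map := PySem.Dict.ofList pvLabels
  let values := types
  if values.isEmpty then "없음"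
  else
    let parts := order.foldl (fun parts t =>
      values.foldl (fun parts v =>
        if v == t then parts ++ [label_map.getD t t] else parts) parts) []
    let parts := values.foldl (fun parts v =>
      if !(order.contains v) then parts ++ [v] else parts) parts
    PySem.Str.join ", " parts

-- ===== PRECONDITION & SPEC =====
def Spec_humanize_compute_types (types : List String) (out : String) : Prop := out = humanize_compute_types_alt types
instance (types : List String) (out : String) : Decidable (Spec_humanize_compute_types types out) := by unfold Spec_humanize_compute_types; infer_instance

-- ===== CLAIM (what is proved, stated in full; the proofs are below) =====
def Claim_equal_humanize_compute_types : Prop := ∀ (types : List String), Dom_humanize_compute_types types → Spec_humanize_compute_types types (humanize_compute_types types)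

-- ===== LEMMAS AND PROOFS =====

-- A's key applied to the fixed order list (proof-side abbreviation)
def pvKey (x : String) : Nat := pvKeyA pvOrder x

-- the bucket decomposition B computes (element level, before labelling)
def pvBuckets (xs : List String) : List String :=
  pvOrder.flatMap (fun t => xs.filter (fun v => v == t))
    ++ xs.filter (fun v => !(pvOrder.contains v))

theorem pvKey_of_not_mem {y : String} (h : pvOrder.contains y = false) : pvKey y = 999 := by
  unfold pvKey pvKeyA
  rw [h]
  simp

theorem pvKey_le (y : String) : pvKey y ≤ 999 := by
  unfold pvKey pvKeyA
  split
  · rcases h : PySem.List.index? pvOrder y with _ | k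
    · simp
    · obtain ⟨pre, suf, hsplit, hlen, _⟩ := (PySem.List.index?_eq_some_iff _ _ _).mp h
      have h8 : pvOrder.length = 8 := rfl
      have : pre.length < pvOrder.length := by rw [hsplit]; simp
      simp only [Option.getD_some]
      omega
  · exact le_refl _

theorem pvKey_of_index {t : String} {k : Nat} (h : PySem.List.index? pvOrder t = some k) :
    pvKey t = k := by
  have hmem : t ∈ pvOrder := by
    rw [← PySem.List.index?_isSome_iff, h]; rfl
  rw [PySem.List.index?_eq_idxOf?] at h
  simp [pvKey, pvKeyA, hmem, h]

-- a key outside the label dict is returned unchanged by .get(v, v)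
theorem pv_labels_unknown {v : String} (h : pvOrder.contains v = false) :
    (PySem.Dict.ofList pvLabels).getD v v = v := by
  apply PySem.Dict.getD_of_not_contains
  simp [pvOrder] at h
  simp [pvLabels, PySem.Dict.ofList, PySem.Dict.update, PySem.Dict.insert, PySem.Dict.contains, PySem.Dict.empty]
  tauto

-- insertBy places x after a block where `before` is false and before a block where it is true
theorem pv_insertBy_middle {α : Type} (p : α → α → Bool) (x : α) (l1 l2 : List α)
    (h1 : ∀ y ∈ l1, p x y = false) (h2 : ∀ y ∈ l2, p x y = true) :
    PySem.List.insertBy p x (l1 ++ l2) = l1 ++ x :: l2 := by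
  induction l1 with
  | nil =>
    cases l2 with
    | nil => rfl
    | cons z zs =>
      simp only [List.nil_append, PySem.List.insertBy]
      rw [h2 z (by simp)]
      simp
  | cons a as ih =>
    simp only [List.cons_append, PySem.List.insertBy]
    rw [h1 a (by simp)]
    simp only [Bool.false_eq_true, if_false]
    rw [ih (fun y hy => h1 y (by simp [hy]))]

-- membership in a filter (· == t) forces equality with t

-- membership in a filter (· == t) forces equality with t
theorem pv_mem_filter_eq {xs : List String} {t v : String}
    (h : v ∈ xs.filter (fun w => w == t)) : v = t := by
  have := (List.mem_filter.mp h).2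
  simpa using this

theorem pvKey_lt_of_suffix {pre suf : List String} {x t : String}
    (hsplit : pvOrder = pre ++ x :: suf) (ht : t ∈ suf)
    (hnd : pvOrder.Nodup) : pre.length < pvKey t := by
  have hmem : t ∈ pvOrder := by rw [hsplit]; simp [ht]
  obtain ⟨k, hk⟩ := Option.isSome_iff_exists.mp ((PySem.List.index?_isSome_iff _ _).mpr hmem)
  rw [pvKey_of_index hk]
  obtain ⟨hklt, hget, _⟩ := PySem.List.getElem_of_index?_eq_some hk
  -- t ∉ pre and t ≠ x from Nodup
  rw [hsplit] at hnd
  have hnotpre : t ∉ pre := by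
    intro hp
    rcases List.nodup_append.mp hnd with ⟨_, _, hdisj⟩
    exact hdisj t hp t (by simp [ht]) rfl
  have hne : t ≠ x := by
    intro he
    rcases List.nodup_append.mp hnd with ⟨_, hnd2, _⟩
    rcases List.nodup_cons.mp hnd2 with ⟨hxs, _⟩
    exact hxs (he ▸ ht)
  by_contra hle
  rw [not_lt] at hle
  rcases Nat.lt_or_ge k pre.length with hlt | hge
  · apply hnotpre
    have hklt' : k < (pre ++ x :: suf).length := hsplit ▸ hklt
    have hget' : (pre ++ x :: suf)[k]'hklt' = t := by
      rw [← hget]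
      congr 1
      exact hsplit.symm
    have : pre[k]'hlt = t := by
      rw [← hget']
      exact (List.getElem_append_left _).symm
    exact this ▸ List.getElem_mem hlt
  · have hkeq : k = pre.length := le_antisymm hle hge
    apply hne
    subst hkeq
    have hklt' : pre.length < (pre ++ x :: suf).length := hsplit ▸ hklt
    have hget' : (pre ++ x :: suf)[pre.length]'hklt' = t := by
      rw [← hget]
      congr 1
      exact hsplit.symm
    have : (pre ++ x :: suf)[pre.length]'hklt' = x := by simp
    rw [hget'] at this
    exact this

theorem pvKey_lt_of_prefix {pre suf : List String} {x t : String}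
    (hsplit : pvOrder = pre ++ x :: suf) (ht : t ∈ pre) : pvKey t < pre.length := by
  have hidx : PySem.List.index? pvOrder t = PySem.List.index? pre t := by
    rw [hsplit]
    exact PySem.List.index?_append_of_mem _ ht
  obtain ⟨k, hk⟩ := Option.isSome_iff_exists.mp ((PySem.List.index?_isSome_iff _ _).mpr ht)
  rw [pvKey_of_index (hidx.trans hk)]
  obtain ⟨pre2, suf2, hs2, hl2, _⟩ := (PySem.List.index?_eq_some_iff _ _ _).mp hk
  have : pre.length = pre2.length + suf2.length + 1 := by rw [hs2]; simp; omega
  omega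

theorem pvOrder_nodup : pvOrder.Nodup := by decide

-- the insertion step of A's insertion sort lands exactly on B's bucket shape
theorem pvBuckets_step (xs : List String) (x : String) :
    PySem.List.insertBy (fun a b => decide (pvKey a < pvKey b)) x (pvBuckets xs)
      = pvBuckets (xs ++ [x]) := by
  by_cases hx : pvOrder.contains x = true
  · -- x is a known type: split order at its (unique) position
    have hmem : x ∈ pvOrder := by simpa using hx
    obtain ⟨k, hk⟩ := Option.isSome_iff_exists.mp ((PySem.List.index?_isSome_iff _ _).mpr hmem)
    obtain ⟨pre, suf, hsplit, hlen, hxpre⟩ := (PySem.List.index?_eq_some_iff _ _ _).mp hk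
    have hkx : pvKey x = pre.length := by rw [pvKey_of_index hk]; omega
    have hnd : pvOrder.Nodup := pvOrder_nodup
    have hndsplit : (pre ++ x :: suf).Nodup := hsplit ▸ hnd
    have hxsuf : x ∉ suf := by
      rcases List.nodup_cons.mp (List.nodup_append.mp hndsplit).2.1 with ⟨h1, _⟩
      exact h1
    -- rewrite both sides into prefix/own-bucket/suffix form
    have lhs_eq : pvBuckets xs
        = (pre.flatMap (fun t => xs.filter (fun v => v == t)) ++ xs.filter (fun v => v == x))
          ++ (suf.flatMap (fun t => xs.filter (fun v => v == t))
              ++ xs.filter (fun v => !(pvOrder.contains v))) := by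
      unfold pvBuckets
      rw [hsplit]
      simp [List.flatMap_append, List.flatMap_cons]
    rw [lhs_eq, pv_insertBy_middle]
    · -- equality of shapes with pvBuckets (xs ++ [x])
      unfold pvBuckets
      rw [hsplit]
      have hfpre : ∀ t ∈ pre, (xs ++ [x]).filter (fun v => v == t) = xs.filter (fun v => v == t) := by
        intro t ht
        rw [List.filter_append]
        have : x ≠ t := fun he => hxpre (he ▸ ht)
        simp [this]
      have hfsuf : ∀ t ∈ suf, (xs ++ [x]).filter (fun v => v == t) = xs.filter (fun v => v == t) := by
        intro t ht
        rw [List.filter_append]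
        have : x ≠ t := fun he => hxsuf (he ▸ ht)
        simp [this]
      have hfx : (xs ++ [x]).filter (fun v => v == x) = xs.filter (fun v => v == x) ++ [x] := by
        rw [List.filter_append]; simp
      have hfu : (xs ++ [x]).filter (fun v => !((pre ++ x :: suf).contains v))
          = xs.filter (fun v => !((pre ++ x :: suf).contains v)) := by
        rw [List.filter_append]; simp
      rw [List.flatMap_append, List.flatMap_cons, hfx, hfu,
          List.flatMap_congr hfpre, List.flatMap_congr hfsuf]
      simp
    · -- everything in the prefix buckets (and x's own) has key ≤ key x
      intro y hy
      simp only [decide_eq_false_iff_not, not_lt, hkx]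
      rcases List.mem_append.mp hy with hy | hy
      · obtain ⟨t, ht, hyt⟩ := List.mem_flatMap.mp hy
        rw [pv_mem_filter_eq hyt]
        exact le_of_lt (pvKey_lt_of_prefix hsplit ht)
      · rw [pv_mem_filter_eq hy, hkx]
    · -- everything in the suffix buckets and the unknown bucket has key > key x
      intro y hy
      simp only [decide_eq_true_eq, hkx]
      rcases List.mem_append.mp hy with hy | hy
      · obtain ⟨t, ht, hyt⟩ := List.mem_flatMap.mp hy
        rw [pv_mem_filter_eq hyt]
        exact pvKey_lt_of_suffix hsplit ht hnd
      · have := (List.mem_filter.mp hy).2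
        have hyc : pvOrder.contains y = false := by simpa using this
        rw [pvKey_of_not_mem hyc]
        have : pre.length < pvOrder.length := by rw [hsplit]; simp
        have h8 : pvOrder.length = 8 := rfl
        omega
  · -- x is unknown: it goes to the very end
    have hx' : pvOrder.contains x = false := by simpa using hx
    rw [PySem.List.insertBy_of_forall_not_before]
    · unfold pvBuckets
      have hxm : x ∉ pvOrder := by simpa using hx'
      have hf : ∀ t ∈ pvOrder, (xs ++ [x]).filter (fun v => v == t) = xs.filter (fun v => v == t) := by
        intro t ht
        rw [List.filter_append]
        have : x ≠ t := fun he => hxm (he ▸ ht)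
        simp [this]
      have hfu : (xs ++ [x]).filter (fun v => !(pvOrder.contains v))
          = xs.filter (fun v => !(pvOrder.contains v)) ++ [x] := by
        rw [List.filter_append]; simp [hxm]
      rw [List.flatMap_congr hf, hfu]
      simp
    · intro y _
      simp only [decide_eq_false_iff_not, not_lt, pvKey_of_not_mem hx']
      exact pvKey_le y

theorem pv_sorted_eq_buckets (xs : List String) :
    PySem.List.sorted xs pvKey false = pvBuckets xs := by
  induction xs using List.reverseRecOn with
  | nil => rfl
  | append_singleton ys y ih =>
    rw [PySem.List.sorted_eq_foldl_insertBy] at ih ⊢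
    rw [List.foldl_append]
    simp only [List.foldl_cons, List.foldl_nil]
    rw [ih, pvBuckets_step]

theorem pv_main (types : List String) :
    humanize_compute_types types = humanize_compute_types_alt types := by
  unfold humanize_compute_types humanize_compute_types_alt
  simp only []
  have hsort : PySem.List.sorted types (fun x => pvKeyA pvOrder x) false = pvBuckets types :=
    pv_sorted_eq_buckets types
  rw [hsort]
  by_cases hnil : types = []
  · subst hnil; rfl
  · have h1 : (pvBuckets types).isEmpty = false := by
      have hne : pvBuckets types ≠ [] := by
        rw [← hsort]
        intro h
        exact hnil ((PySem.List.sorted_eq_nil_iff _ _ _).mp h)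
      simp [hne]
    have h2 : types.isEmpty = false := by simp [hnil]
    rw [h1, h2]
    simp only [Bool.false_eq_true, if_false]
    -- compute B's parts: turn the three loops into filter/map/flatMap form
    have hinner : ∀ (t : String) (acc : List String),
        List.foldl (fun parts v =>
          if (v == t) = true then parts ++ [(PySem.Dict.ofList pvLabels).getD t t] else parts) acc types
        = acc ++ (types.filter (fun v => v == t)).map (fun _ => (PySem.Dict.ofList pvLabels).getD t t) :=
      fun t acc => PySem.List.foldl_append_if _ _ _ _
    simp only [hinner]
    rw [PySem.List.foldl_append_eq_flatMap, PySem.List.foldl_append_if_eq_filter]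
    simp only [List.nil_append]
    congr 1
    unfold pvBuckets
    rw [List.map_append]
    congr 1
    · rw [List.map_flatMap]
      apply List.flatMap_congr
      intro t ht
      apply List.map_congr_left
      intro v hv
      rw [pv_mem_filter_eq hv]
    · apply (List.map_congr_left ?_).trans (List.map_id _)
      intro v hv
      have := (List.mem_filter.mp hv).2
      exact pv_labels_unknown (by simpa using this)

-- ===== VERDICT (by name: the statement is the Claim_ definition above) =====
theorem humanize_compute_types_spec : Claim_equal_humanize_compute_types := by
  intro types _
  exact pv_main types
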